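-- pv_equiv track=rewrite | github.com/nikita-petrashen/yandex_algs | paths_in_a_tree/main.py | gather_subpaths
-- ===== SOURCE A (Python) =====
-- from collections import deque, defaultdict
--
-- def gather_subpaths(path, x):
--     cumsums = defaultdict(list)
--     cumsums[0] = [-1]
--     cur_sum = 0
--     valid_paths = set()
--     for idx, w in path:
--         cur_sum += w
--         for start_idx in cumsums[cur_sum-x]:
--             valid_paths.add((idx, start_idx))
--         cumsums[cur_sum].append(idx)
--
--     return valid_paths
-- ===== SOURCE B (Python) =====
-- def gather_subpaths(path, x):
--     # Phase 1: prefix sums with a sentinel entry (-1, 0).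
--     prefixes = [(-1, 0)]
--     s = 0
--     for idx, w in path:
--         s += w
--         prefixes.append((idx, s))
--     # Phase 2: quadratic scan over pairs of prefix entries, no dict needed.
--     result = set()
--     earlier = []
--     for idx_i, s_i in prefixes:
--         for idx_j, s_j in earlier:
--             if s_i - s_j == x:
--                 result.add((idx_i, idx_j))
--         earlier.append((idx_i, s_i))
--     return result
-- ===== Notes on version B (the rewrite author's own statement) =====
-- stated objective: alternative
-- what changed: Replaced the defaultdict of cumulative-sum buckets with an explicit prefix-sum list (sentinel (-1,0) included) and a nested scan over all earlier prefix entries, trading the hashed lookup for a dict-free quadratic pair scan.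
import Mathlib
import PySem

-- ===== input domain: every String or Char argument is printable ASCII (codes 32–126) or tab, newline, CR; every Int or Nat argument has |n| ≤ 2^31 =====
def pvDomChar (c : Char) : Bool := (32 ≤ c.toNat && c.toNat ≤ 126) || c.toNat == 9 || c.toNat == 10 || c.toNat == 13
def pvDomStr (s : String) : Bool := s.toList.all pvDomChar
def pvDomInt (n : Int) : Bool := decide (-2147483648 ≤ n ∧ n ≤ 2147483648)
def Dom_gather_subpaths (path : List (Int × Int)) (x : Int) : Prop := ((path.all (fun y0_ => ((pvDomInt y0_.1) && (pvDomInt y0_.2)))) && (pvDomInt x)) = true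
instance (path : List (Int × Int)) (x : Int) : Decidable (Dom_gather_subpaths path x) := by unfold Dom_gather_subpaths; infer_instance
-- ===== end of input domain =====

-- B replaces A's defaultdict of cumulative-sum buckets by an explicit prefix-sum list
-- (with the (-1, 0) sentinel) and a dict-free nested scan over earlier entries (alternative, not faster).
-- Both Pythons return a set; the equivalence is about the set's element list built in emission order (PySem.Set).

-- ===== PORT A =====
-- the main loop of A: cumsums is the defaultdict (a missing key reads as []; the empty-list
-- entry a defaultdict read would create is never observable, so the read is ported as getD,
-- and 'cumsums[cur_sum].append(idx)' as 'modify cur_sum [] (· ++ [idx])' — exact on values)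
def gsLoopA (x : Int) : List (Int × Int) → PySem.Dict Int (List Int) → Int → PySem.Set (Int × Int) → PySem.Set (Int × Int)
  | [], _, _, valid => valid
  | (idx, w) :: rest, cumsums, cur, valid =>
    let cur' := cur + w
    let valid' := (cumsums.getD (cur' - x) []).foldl (fun r j => PySem.Set.add r (idx, j)) valid
    gsLoopA x rest (cumsums.modify cur' [] (· ++ [idx])) cur' valid'

def gather_subpaths (path : List (Int × Int)) (x : Int) : List (Int × Int) :=
  gsLoopA x path (PySem.Dict.insert PySem.Dict.empty 0 [-1]) 0 PySem.Set.empty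

-- ===== PORT B =====
-- phase 1 of Source B: the prefix-sum list, starting from the sentinel (-1, 0)
def gsPrefixes (path : List (Int × Int)) : List (Int × Int) :=
  (path.foldl (fun (st : List (Int × Int) × Int) p => (st.1 ++ [(p.1, st.2 + p.2)], st.2 + p.2))
    ([((-1 : Int), (0 : Int))], (0 : Int))).1

-- phase 2 of Source B: for each entry, scan all strictly earlier entries
def gsLoopB (x : Int) : List (Int × Int) → List (Int × Int) → PySem.Set (Int × Int) → PySem.Set (Int × Int)
  | [], _, res => res
  | (i, si) :: rest, earlier, res =>
    let res' := earlier.foldl (fun r p => if si - p.2 == x then PySem.Set.add r (i, p.1) else r) res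
    gsLoopB x rest (earlier ++ [(i, si)]) res'

def gather_subpaths_alt (path : List (Int × Int)) (x : Int) : List (Int × Int) :=
  gsLoopB x (gsPrefixes path) [] PySem.Set.empty

-- ===== PRECONDITION & SPEC =====
def Spec_gather_subpaths (path : List (Int × Int)) (x : Int) (out : List (Int × Int)) : Prop := out = gather_subpaths_alt path x
instance (path : List (Int × Int)) (x : Int) (out : List (Int × Int)) : Decidable (Spec_gather_subpaths path x out) := by unfold Spec_gather_subpaths; infer_instance

-- ===== CLAIM (what is proved, stated in full; the proofs are below) =====
def Claim_equal_gather_subpaths : Prop := ∀ (path : List (Int × Int)) (x : Int), Dom_gather_subpaths path x → Spec_gather_subpaths path x (gather_subpaths path x)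

-- ===== LEMMAS AND PROOFS =====

-- the prefix entries B's first loop produces after the sentinel, as a structural recursion
def gsTail : List (Int × Int) → Int → List (Int × Int)
  | [], _ => []
  | (i, w) :: rest, s => (i, s + w) :: gsTail rest (s + w)

theorem gsPrefixes_aux (path : List (Int × Int)) :
    ∀ (acc : List (Int × Int)) (s : Int),
      (path.foldl (fun (st : List (Int × Int) × Int) p => (st.1 ++ [(p.1, st.2 + p.2)], st.2 + p.2)) (acc, s)).1
        = acc ++ gsTail path s := by
  induction path with
  | nil => intro acc s; simp [gsTail]
  | cons p rest ih =>
    intro acc s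
    obtain ⟨i, w⟩ := p
    simp [List.foldl, gsTail, ih]

theorem gsPrefixes_eq (path : List (Int × Int)) :
    gsPrefixes path = ((-1 : Int), (0 : Int)) :: gsTail path 0 := by
  simpa [gsPrefixes] using gsPrefixes_aux path [((-1 : Int), (0 : Int))] 0

-- B's inner conditional fold equals A's fold over exactly the matching earlier indices
theorem gsInner_eq (x i si : Int) (earlier : List (Int × Int)) :
    ∀ (res : PySem.Set (Int × Int)),
      earlier.foldl (fun r p => if si - p.2 == x then PySem.Set.add r (i, p.1) else r) res
        = ((earlier.filter (fun p => p.2 == si - x)).map Prod.fst).foldl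
            (fun r j => PySem.Set.add r (i, j)) res := by
  induction earlier with
  | nil => intro res; simp
  | cons p rest ih =>
    intro res
    obtain ⟨j, sj⟩ := p
    by_cases h : sj = si - x
    · have h1 : (si - sj == x) = true := by simp; omega
      have h2 : (sj == si - x) = true := by simp; omega
      simp only [List.foldl_cons, List.filter_cons, h1, h2, if_true, List.map_cons]
      exact ih _
    · have h1 : (si - sj == x) = false := by simp; omega
      have h2 : (sj == si - x) = false := by simp; omega
      simp only [List.foldl_cons, List.filter_cons, h1, h2, Bool.false_eq_true, if_false]
      exact ih _

-- main invariant: the dict bucket for every sum s is exactly the first components of the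
-- earlier prefix entries whose prefix sum is s, in order
theorem gsMain (x : Int) (path : List (Int × Int)) :
    ∀ (cur : Int) (cumsums : PySem.Dict Int (List Int)) (earlier : List (Int × Int))
      (valid : PySem.Set (Int × Int)),
      (∀ s : Int, cumsums.getD s [] = (earlier.filter (fun p => p.2 == s)).map Prod.fst) →
      gsLoopA x path cumsums cur valid = gsLoopB x (gsTail path cur) earlier valid := by
  induction path with
  | nil => intro cur cumsums earlier valid _; simp [gsLoopA, gsTail, gsLoopB]
  | cons p rest ih =>
    intro cur cumsums earlier valid hinv
    obtain ⟨idx, w⟩ := p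
    show gsLoopA x ((idx, w) :: rest) cumsums cur valid
        = gsLoopB x ((idx, cur + w) :: gsTail rest (cur + w)) earlier valid
    rw [gsLoopA, gsLoopB]
    have hval :
        (cumsums.getD (cur + w - x) []).foldl (fun r j => PySem.Set.add r (idx, j)) valid
          = earlier.foldl (fun r p => if cur + w - p.2 == x then PySem.Set.add r (idx, p.1) else r) valid := by
      rw [hinv, gsInner_eq]
    rw [hval]
    apply ih
    intro s
    rw [PySem.Dict.getD_modify, hinv, hinv]
    by_cases hs : s = cur + w
    · subst hs
      simp [List.filter_append]
    · have : ((cur + w : Int) == s) = false := by simp; omega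
      simp [hs, List.filter_append, this]

-- ===== VERDICT (by name: the statement is the Claim_ definition above) =====
theorem gather_subpaths_spec : Claim_equal_gather_subpaths := by
  intro path x _
  show gather_subpaths path x = gather_subpaths_alt path x
  unfold gather_subpaths gather_subpaths_alt
  rw [gsPrefixes_eq, gsLoopB]
  simp only [List.foldl_nil]
  apply gsMain
  intro s
  rw [PySem.Dict.getD_insert]
  by_cases hs : s = 0
  · subst hs; simp
  · have : ((0 : Int) == s) = false := by simp; omega
    simp [hs, PySem.Dict.getD_empty, this]
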